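-- pv_equiv track=rewrite | github.com/pedraoguimaraes/if968 | agenda.py | ordenarPorPrioridade
-- ===== SOURCE A (Python) =====
-- def ordenarPorPrioridade(itens):
--   listatemp = itens
--   listaOrdenada = []
--   listaSemOrdem = []
--   letras = ['A','B','C','D','E','F','G','H','I','J','K','L','M','N','O','P','Q',
--             'R','S','T','U','V','W','X','Y','Z']
--   i = 0
--   while i < len(itens):
--     if listatemp[i][1][1][2] == '':
--         listaSemOrdem.append(itens[i])
--     i +=1
--   j = 0
--   while j<len(letras):
--     k = 0
--     while k<len(listatemp):
--       if listatemp[k][1][1][2] != '':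
--         if itens[k][1][1][2][1].upper() == letras[j]:
--           listaOrdenada.append(listatemp[k])
--       k+=1
--     j+=1
--
--   listao = listaOrdenada+listaSemOrdem
--
--   return listao
-- ===== SOURCE B (Python) =====
-- def ordenarPorPrioridade(itens):
--   buckets = [[] for _ in range(26)]
--   semOrdem = []
--   for item in itens:
--     p = item[1][1][2]
--     if p == '':
--       semOrdem.append(item)
--     else:
--       idx = ord(p[1].upper()) - ord('A')
--       if 0 <= idx < 26:
--         buckets[idx].append(item)
--   saida = []
--   for b in buckets:
--     saida += b
--   saida += semOrdem
--   return saida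
-- ===== Notes on version B (the rewrite author's own statement) =====
-- stated objective: alternative
-- what changed: A rescans the whole list once per letter (26 passes plus a separate unprioritized pass); B makes a single bucketing pass into 26 letter buckets plus an unprioritized list, then emits the buckets A..Z in order.
import Mathlib
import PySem

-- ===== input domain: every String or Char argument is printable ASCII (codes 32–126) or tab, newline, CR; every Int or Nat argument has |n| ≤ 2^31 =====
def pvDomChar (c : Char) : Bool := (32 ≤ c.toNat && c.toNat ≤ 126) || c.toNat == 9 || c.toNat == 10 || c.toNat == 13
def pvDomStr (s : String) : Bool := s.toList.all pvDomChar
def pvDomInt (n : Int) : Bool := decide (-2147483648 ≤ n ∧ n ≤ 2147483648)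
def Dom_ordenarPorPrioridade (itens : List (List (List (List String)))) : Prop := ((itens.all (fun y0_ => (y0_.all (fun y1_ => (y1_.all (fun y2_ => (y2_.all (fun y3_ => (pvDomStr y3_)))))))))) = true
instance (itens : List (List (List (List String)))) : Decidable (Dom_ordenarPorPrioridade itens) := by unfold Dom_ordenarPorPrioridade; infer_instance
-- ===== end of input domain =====

-- B replaces A's 26 rescans of the input list (one per letter) by a single bucketing pass into 26 letter lists
-- followed by one emit pass; same output order, unprioritized items last, non-A–Z priorities dropped.

-- shared field access item[1][1][2] (exact under Pre_, which puts every index in range)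
def pvPri (it : List (List (List String))) : String :=
  PySem.List.pyGetD (PySem.List.pyGetD (PySem.List.pyGetD it 1 []) 1 []) 2 ""

-- p[1].upper() (exact under Pre_: nonempty priority strings have length ≥ 2)
def pvKey (p : String) : Char :=
  PySem.Chars.upperChar (PySem.List.pyGetD p.toList 1 ' ')

-- ===== PORT A =====
def ordenarPorPrioridade (itens : List (List (List (List String)))) : List (List (List (List String))) :=
  let listatemp := itens
  let listaSemOrdem := itens.foldl (fun acc it => if pvPri it = "" then acc ++ [it] else acc) []
  let letras : List Char := ['A','B','C','D','E','F','G','H','I','J','K','L','M',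
                             'N','O','P','Q','R','S','T','U','V','W','X','Y','Z']
  let listaOrdenada := letras.foldl (fun acc l =>
      listatemp.foldl (fun acc2 it =>
        if pvPri it ≠ "" then
          (if pvKey (pvPri it) = l then acc2 ++ [it] else acc2)
        else acc2) acc) []
  listaOrdenada ++ listaSemOrdem

-- ===== PORT B =====
def ordenarPorPrioridade_alt (itens : List (List (List (List String)))) : List (List (List (List String))) :=
  let st := itens.foldl (fun (st : List (List (List (List (List String)))) × List (List (List (List String)))) it =>
      let p := pvPri it
      if p = "" then (st.1, st.2 ++ [it])
      else
        let idx : Int := (pvKey p).toNat - 65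
        if 0 ≤ idx ∧ idx < 26 then (st.1.set idx.toNat (st.1.getD idx.toNat [] ++ [it]), st.2)
        else st)
    (List.replicate 26 [], [])
  st.1.foldl (fun acc b => acc ++ b) [] ++ st.2

-- ===== PRECONDITION & SPEC =====
-- Pre_ excludes exactly the inputs where Python A raises IndexError: an item too short for the
-- item[1][1][2] access, or a nonempty priority string of length < 2 (so p[1] raises).
def Pre_ordenarPorPrioridade (itens : List (List (List (List String)))) : Prop :=
  ∀ it ∈ itens, 2 ≤ it.length ∧ 2 ≤ (it.getD 1 []).length ∧ 3 ≤ ((it.getD 1 []).getD 1 []).length ∧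
    (pvPri it ≠ "" → 2 ≤ (pvPri it).toList.length)
instance (itens : List (List (List (List String)))) : Decidable (Pre_ordenarPorPrioridade itens) := by unfold Pre_ordenarPorPrioridade; infer_instance

def pvWitness_ordenarPorPrioridade : List (List (List (List String))) :=
  [[[["t1"]], [["a"], ["x", "y", "(b)"]]],
   [[["t2"]], [["a"], ["x", "y", ""]]],
   [[["t3"]], [["a"], ["x", "y", "(a)"]]]]

def Spec_ordenarPorPrioridade (itens : List (List (List (List String)))) (out : List (List (List (List String)))) : Prop := out = ordenarPorPrioridade_alt itens
instance (itens : List (List (List (List String)))) (out : List (List (List (List String)))) : Decidable (Spec_ordenarPorPrioridade itens out) := by unfold Spec_ordenarPorPrioridade; infer_instance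

-- ===== CLAIM (what is proved, stated in full; the proofs are below) =====
def Claim_equal_ordenarPorPrioridade : Prop := ∀ (itens : List (List (List (List String)))), Dom_ordenarPorPrioridade itens → Pre_ordenarPorPrioridade itens → Spec_ordenarPorPrioridade itens (ordenarPorPrioridade itens)

-- ===== LEMMAS AND PROOFS =====

def pvF (j : Nat) (it : List (List (List String))) : Bool :=
  decide (pvPri it ≠ "") && ((pvKey (pvPri it)).toNat == 65 + j)
def pvSem (it : List (List (List String))) : Bool := decide (pvPri it = "")

lemma getD_set (bs : List (List α)) (m : Nat) (v : List α) (j : Nat) (h : m < bs.length) :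
    (bs.set m v).getD j [] = if j = m then v else bs.getD j [] := by
  by_cases hj : j < bs.length
  · rw [List.getD_eq_getElem _ _ (by simpa using hj), List.getD_eq_getElem _ _ hj, List.getElem_set]
    by_cases hjm : j = m
    · simp [hjm]
    · rw [if_neg (fun h' => hjm h'.symm), if_neg hjm]
  · rw [List.getD_eq_default _ _ (by simpa using hj), List.getD_eq_default _ _ (by omega),
      if_neg (by omega)]

lemma B_inv (itens : List (List (List (List String)))) :
    ∀ (bs : List (List (List (List (List String))))) (sem : List (List (List (List String)))),
    bs.length = 26 →
    (itens.foldl (fun (st : List (List (List (List (List String)))) × List (List (List (List String)))) it =>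
      let p := pvPri it
      if p = "" then (st.1, st.2 ++ [it])
      else
        let idx : Int := (pvKey p).toNat - 65
        if 0 ≤ idx ∧ idx < 26 then (st.1.set idx.toNat (st.1.getD idx.toNat [] ++ [it]), st.2)
        else st) (bs, sem)) =
    ((List.range 26).map (fun j => bs.getD j [] ++ itens.filter (pvF j)) , sem ++ itens.filter pvSem) := by
  induction itens with
  | nil =>
    intro bs sem h
    simp only [List.foldl_nil, List.filter_nil, List.append_nil]
    refine Prod.ext ?_ rfl
    apply List.ext_getElem (by simp [h])
    intro i h1 h2
    simp only [List.getElem_map, List.getElem_range]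
    rw [List.getD_eq_getElem _ _ (by omega)]
  | cons it rest ih =>
    intro bs sem h
    simp only [List.foldl_cons]
    by_cases hp : pvPri it = ""
    · simp only [hp, if_pos rfl, reduceIte]
      rw [ih bs (sem ++ [it]) h]
      refine Prod.ext ?_ ?_
      · simp only []
        apply List.map_congr_left
        intro j hj
        simp [List.filter_cons, pvF, hp]
      · simp [List.filter_cons, pvSem, hp, List.append_assoc]
    · simp only [hp, reduceIte]
      by_cases hr : (0:Int) ≤ ((pvKey (pvPri it)).toNat : Int) - 65 ∧ ((pvKey (pvPri it)).toNat : Int) - 65 < 26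
      · rw [if_pos hr]
        have hn : 65 ≤ (pvKey (pvPri it)).toNat ∧ (pvKey (pvPri it)).toNat < 91 := by
          constructor <;> omega
        have hidx : (((pvKey (pvPri it)).toNat : Int) - 65).toNat = (pvKey (pvPri it)).toNat - 65 := by omega
        rw [hidx, ih _ sem (by simp [h])]
        refine Prod.ext ?_ ?_
        · dsimp only
          apply List.map_congr_left
          intro j hj
          simp only [List.mem_range] at hj
          rw [getD_set _ _ _ _ (by omega), List.filter_cons]
          by_cases hje : j = (pvKey (pvPri it)).toNat - 65
          · have : pvF j it = true := by simp [pvF, hp]; omega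
            subst hje
            simp [this, List.append_assoc]
          · have : pvF j it = false := by simp [pvF, hp]; omega
            simp [hje, this]
        · simp [List.filter_cons, pvSem, hp]
      · rw [if_neg hr]
        rw [ih bs sem h]
        refine Prod.ext ?_ ?_
        · dsimp only
          apply List.map_congr_left
          intro j hj
          simp only [List.mem_range] at hj
          have : pvF j it = false := by
            simp [pvF, hp]
            push_neg at hr
            omega
          simp [List.filter_cons, this]
        · simp [List.filter_cons, pvSem, hp]

lemma A_inner (itens : List (List (List (List String)))) (l : Char) (acc : List (List (List (List String)))) :
    itens.foldl (fun acc2 it => if pvPri it ≠ "" then (if pvKey (pvPri it) = l then acc2 ++ [it] else acc2) else acc2) acc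
    = acc ++ itens.filter (fun it => decide (pvPri it ≠ "") && decide (pvKey (pvPri it) = l)) := by
  have hf : (fun (acc2 : List (List (List (List String)))) it => if pvPri it ≠ "" then (if pvKey (pvPri it) = l then acc2 ++ [it] else acc2) else acc2)
      = fun acc2 it => if (decide (pvPri it ≠ "") && decide (pvKey (pvPri it) = l)) = true then acc2 ++ [it] else acc2 := by
    funext acc2 it
    by_cases h1 : pvPri it = "" <;> by_cases h2 : pvKey (pvPri it) = l <;> simp [h1, h2]
  rw [hf]
  simpa using PySem.List.foldl_append_if (fun it => decide (pvPri it ≠ "") && decide (pvKey (pvPri it) = l)) id itens acc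

lemma A_sem (itens : List (List (List (List String)))) :
    itens.foldl (fun acc it => if pvPri it = "" then acc ++ [it] else acc) [] = itens.filter pvSem := by
  have hf : (fun (acc : List (List (List (List String)))) it => if pvPri it = "" then acc ++ [it] else acc)
      = fun acc it => if pvSem it = true then acc ++ [it] else acc := by
    funext acc it
    by_cases h1 : pvPri it = "" <;> simp [h1, pvSem]
  rw [hf]
  simpa using PySem.List.foldl_append_if pvSem id itens []

lemma filter_letter (itens : List (List (List (List String)))) (j : Nat) (hj : j < 26) :
    itens.filter (fun it => decide (pvPri it ≠ "") && decide (pvKey (pvPri it) = Char.ofNat (65+j)))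
    = itens.filter (pvF j) := by
  apply List.filter_congr
  intro it _
  have hc : (Char.ofNat (65+j)).toNat = 65+j := by interval_cases j <;> decide
  by_cases hk : (pvKey (pvPri it)).toNat = 65 + j
  · have he : pvKey (pvPri it) = Char.ofNat (65+j) := Char.ext (UInt32.toNat_inj.mp (hk.trans hc.symm))
    simp [pvF, he, hk, hc]
  · have he : pvKey (pvPri it) ≠ Char.ofNat (65+j) := fun he => hk (by rw [he, hc])
    simp [pvF, he, hk, hc]

theorem pv_main (itens : List (List (List (List String)))) :
    ordenarPorPrioridade itens = ordenarPorPrioridade_alt itens := by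
  simp only [ordenarPorPrioridade, ordenarPorPrioridade_alt]
  rw [B_inv itens (List.replicate 26 []) [] (by simp), A_sem]
  have hord : (['A','B','C','D','E','F','G','H','I','J','K','L','M',
      'N','O','P','Q','R','S','T','U','V','W','X','Y','Z'] : List Char).foldl (fun acc l =>
      itens.foldl (fun acc2 it =>
        if pvPri it ≠ "" then
          (if pvKey (pvPri it) = l then acc2 ++ [it] else acc2)
        else acc2) acc) []
      = (List.range 26).flatMap (fun j => itens.filter (pvF j)) := by
    have hf : (fun (acc : List (List (List (List String)))) (l : Char) =>
        itens.foldl (fun acc2 it =>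
          if pvPri it ≠ "" then
            (if pvKey (pvPri it) = l then acc2 ++ [it] else acc2)
          else acc2) acc)
        = fun acc l => acc ++ itens.filter (fun it => decide (pvPri it ≠ "") && decide (pvKey (pvPri it) = l)) := by
      funext acc l
      exact A_inner itens l acc
    rw [hf, ← List.flatMap_eq_foldl]
    have hl : (['A','B','C','D','E','F','G','H','I','J','K','L','M',
        'N','O','P','Q','R','S','T','U','V','W','X','Y','Z'] : List Char)
        = (List.range 26).map (fun j => Char.ofNat (65+j)) := by decide
    rw [hl, List.flatMap_map]
    apply List.flatMap_congr
    intro j hj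
    exact filter_letter itens j (by simpa using hj)
  rw [hord]
  have hflat : ((List.range 26).map (fun j => (List.replicate 26 ([] : List (List (List (List String))))).getD j [] ++ itens.filter (pvF j))).foldl (fun acc b => acc ++ b) []
      = (List.range 26).flatMap (fun j => itens.filter (pvF j)) := by
    have : ((List.range 26).map (fun j => (List.replicate 26 ([] : List (List (List (List String))))).getD j [] ++ itens.filter (pvF j)))
        = (List.range 26).map (fun j => itens.filter (pvF j)) := by
      apply List.map_congr_left
      intro j hj
      simp only [List.mem_range] at hj
      rw [List.getD_eq_getElem _ _ (by simpa using hj)]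
      rw [List.getElem_replicate]
      simp
    rw [this]
    rw [show (fun (acc b : List (List (List (List String)))) => acc ++ b) = fun acc b => acc ++ id b from rfl,
      ← List.flatMap_eq_foldl, List.flatMap_map]
    rfl
  dsimp only
  rw [hflat]
  simp

-- ===== VERDICT (by name: the statement is the Claim_ definition above) =====
theorem ordenarPorPrioridade_spec : Claim_equal_ordenarPorPrioridade := by
  intro itens _ _
  exact pv_main itens
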